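-- pv_equiv track=rewrite | github.com/FallMarsisus/picophone-app-repo | apps/trivia/main.py | dhtml
-- ===== SOURCE A (Python) =====
-- def dhtml(s):
--     o = ""
--     i = 0
--     n = len(s)
--     while i < n:
--         if s[i] == '&':
--             j = i + 1
--             e = ""
--             while j < n and s[j] != ';' and (j - i) < 12:
--                 e = e + s[j]
--                 j = j + 1
--             if j < n and s[j] == ';':
--                 if e == "amp":
--                     o = o + "&"
--                 elif e == "lt":
--                     o = o + "<"
--                 elif e == "gt":
--                     o = o + ">"
--                 elif e == "quot":
--                     o = o + '"'
--                 elif e == "#039" or e == "apos":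
--                     o = o + "'"
--                 elif e == "ldquo" or e == "rdquo":
--                     o = o + '"'
--                 elif e == "lsquo" or e == "rsquo":
--                     o = o + "'"
--                 elif e == "hellip":
--                     o = o + "..."
--                 else:
--                     o = o + "&" + e + ";"
--                 i = j + 1
--             else:
--                 o = o + "&"
--                 i = i + 1
--         else:
--             o = o + s[i]
--             i = i + 1
--     return o
-- ===== SOURCE B (Python) =====
-- import re
--
-- _ENT = {
--     "amp": "&", "lt": "<", "gt": ">", "quot": '"',
--     "#039": "'", "apos": "'",
--     "ldquo": '"', "rdquo": '"', "lsquo": "'", "rsquo": "'",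
--     "hellip": "...",
-- }
--
-- def dhtml(s):
--     return re.sub(r'&([^;]{0,11});',
--                   lambda m: _ENT.get(m.group(1), m.group(0)), s)
-- ===== Notes on version B (the rewrite author's own statement) =====
-- stated objective: faster
-- what changed: Replaces the hand-rolled index/window scanning loop with quadratic string concatenation and an 11-branch if/elif chain by a single compiled-regex substitution (ampersand, up to 11 non-semicolon body chars, semicolon) whose replacement function looks the entity name up in a dict, defaulting to the unchanged match for unknown entities.
import Mathlib
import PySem

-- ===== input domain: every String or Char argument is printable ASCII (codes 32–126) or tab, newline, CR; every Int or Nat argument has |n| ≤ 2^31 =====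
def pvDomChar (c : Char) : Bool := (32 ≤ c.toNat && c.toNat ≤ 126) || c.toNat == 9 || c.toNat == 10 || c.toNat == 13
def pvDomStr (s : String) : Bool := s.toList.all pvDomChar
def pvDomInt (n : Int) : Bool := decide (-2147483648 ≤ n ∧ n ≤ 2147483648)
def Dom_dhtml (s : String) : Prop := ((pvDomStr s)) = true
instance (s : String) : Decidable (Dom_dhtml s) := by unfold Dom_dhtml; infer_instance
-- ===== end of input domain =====

-- B: one regex substitution (ampersand, up to 11 non-semicolon body chars, semicolon) with a
-- lookup table replacing A's hand-rolled scanning loop and if/elif chain.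

-- ===== PORT A =====
-- A's inner `while` loop: collects entity chars after '&' (budget k chars left, Python's
-- (j-i) < 12 with j starting at i+1 gives budget 11), returns the collected name and the
-- remainder after ';' on success, none when ';' is not found in the window.
def dhtmlInner : List Char → Nat → List Char → Option (List Char × List Char)
  | [], _, _ => none
  | c :: rest, k, e =>
    if c = ';' then some (e, rest)
    else if k = 0 then none
    else dhtmlInner rest (k - 1) (e ++ [c])

-- A's if/elif chain on the entity name e (transliterated branch for branch).
def dhtmlEnt (e : List Char) : List Char :=
  if e = "amp".toList then "&".toList
  else if e = "lt".toList then "<".toList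
  else if e = "gt".toList then ">".toList
  else if e = "quot".toList then "\"".toList
  else if e = "#039".toList ∨ e = "apos".toList then "'".toList
  else if e = "ldquo".toList ∨ e = "rdquo".toList then "\"".toList
  else if e = "lsquo".toList ∨ e = "rsquo".toList then "'".toList
  else if e = "hellip".toList then "...".toList
  else "&".toList ++ e ++ ";".toList

theorem dhtmlInner_len : ∀ (l : List Char) (k : Nat) (e t r : List Char),
    dhtmlInner l k e = some (t, r) → r.length < l.length := by
  intro l
  induction l with
  | nil => intro k e t r h; simp [dhtmlInner] at h
  | cons c rest ih =>
    intro k e t r h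
    simp only [dhtmlInner] at h
    split_ifs at h with h1 h2
    · simp at h
      simp [← h.2]
    · have := ih (k - 1) (e ++ [c]) t r h
      simp
      omega

-- A's outer `while i < n` loop with the output accumulator o.
def dhtmlLoop : List Char → List Char → List Char
  | [], o => o
  | c :: rest, o =>
    if c = '&' then
      match hI : dhtmlInner rest 11 [] with
      | some (e, rem) => dhtmlLoop rem (o ++ dhtmlEnt e)
      | none => dhtmlLoop rest (o ++ ['&'])
    else dhtmlLoop rest (o ++ [c])
  termination_by l => l.length
  decreasing_by
  · have := dhtmlInner_len rest 11 [] e rem hI; simp; omega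
  · simp
  · simp

def dhtml (s : String) : String := String.ofList (dhtmlLoop s.toList [])

-- ===== PORT B =====
-- The replacement table (Python dict, insertion order).
def dhtmlTable : PySem.Dict String String :=
  PySem.Dict.ofList [("amp", "&"), ("lt", "<"), ("gt", ">"), ("quot", "\""),
   ("#039", "'"), ("apos", "'"),
   ("ldquo", "\""), ("rdquo", "\""), ("lsquo", "'"), ("rsquo", "'"),
   ("hellip", "...")]

-- Hand port of re.sub(r'&([^;]{0,11});', repl, s): at each position the pattern matches
-- iff the char is '&', the maximal run of non-';' chars after it (the greedy body,
-- List.takeWhile) has length ≤ 11 and is followed by a ';'; re.sub replaces each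
-- non-overlapping leftmost match by repl(m) = table.get(group1, group0) and copies
-- everything else. Exact: with body = takeWhile (≠ ';'), shorter backtracked bodies
-- can never be followed by ';', so greedy-with-backtracking ≡ this test.
def dhtmlSub : List Char → List Char
  | [] => []
  | c :: rest =>
    if c = '&' then
      let body := rest.takeWhile (fun x => x ≠ ';')
      if body.length ≤ 11 ∧ rest.drop body.length ≠ [] then
        (PySem.Dict.getD dhtmlTable (String.ofList body)
            (String.ofList ('&' :: body ++ [';']))).toList
          ++ dhtmlSub (rest.drop (body.length + 1))
      else c :: dhtmlSub rest
    else c :: dhtmlSub rest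
  termination_by l => l.length
  decreasing_by
  all_goals simp

def dhtml_alt (s : String) : String := String.ofList (dhtmlSub s.toList)

-- ===== PRECONDITION & SPEC =====
def Spec_dhtml (s : String) (out : String) : Prop := out = dhtml_alt s
instance (s : String) (out : String) : Decidable (Spec_dhtml s out) := by unfold Spec_dhtml; infer_instance

-- ===== CLAIM (what is proved, stated in full; the proofs are below) =====
def Claim_equal_dhtml : Prop := ∀ (s : String), Dom_dhtml s → Spec_dhtml s (dhtml s)

-- ===== LEMMAS AND PROOFS =====

theorem ofList_eq_str (e : List Char) (s : String) : (String.ofList e = s) ↔ e = s.toList := by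
  constructor
  · intro h; have := congrArg String.toList h; simpa using this
  · intro h; subst h; simp

theorem pred_semi : (fun x : Char => decide (x ≠ ';')) = (fun x => !(x == ';')) := by
  funext x; simp only [ne_eq, decide_not, ← Bool.beq_eq_decide_eq]

-- A's inner loop found ';' within the window iff the greedy regex body matches.
theorem dhtmlInner_eq (l : List Char) : ∀ (k : Nat) (e : List Char),
    dhtmlInner l k e =
      (if (l.takeWhile (fun x => !(x == ';'))).length ≤ k ∧ l.drop (l.takeWhile (fun x => !(x == ';'))).length ≠ [] then
        some (e ++ l.takeWhile (fun x => !(x == ';')), l.drop ((l.takeWhile (fun x => !(x == ';'))).length + 1))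
      else none) := by
  induction l with
  | nil => intro k e; simp [dhtmlInner]
  | cons c rest ih =>
    intro k e
    by_cases hc : c = ';'
    · subst hc; simp [dhtmlInner]
    · simp only [dhtmlInner, if_neg hc, List.takeWhile_cons,
        show (!(c == ';')) = true from by simp [hc], if_true]
      by_cases hk : k = 0
      · subst hk; simp
      · rw [if_neg hk, ih (k-1) (e ++ [c])]
        by_cases h1 : (rest.takeWhile (fun x => !(x == ';'))).length ≤ k - 1 ∧ rest.drop (rest.takeWhile (fun x => !(x == ';'))).length ≠ []
        · rw [if_pos h1, if_pos ⟨by simp; omega, by simpa using h1.2⟩]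
          simp
        · rw [if_neg h1, if_neg ?_]
          rintro ⟨ha, hb⟩
          exact h1 ⟨by simp at ha ⊢; omega, by simpa using hb⟩

-- B's table lookup with group(0) as default computes A's if/elif chain.
set_option maxHeartbeats 2000000 in
theorem ent_eq (e : List Char) :
    (PySem.Dict.getD dhtmlTable (String.ofList e) (String.ofList ('&' :: e ++ [';']))).toList = dhtmlEnt e := by
  unfold dhtmlTable dhtmlEnt
  simp only [PySem.Dict.ofList, PySem.Dict.update, List.foldl, PySem.Dict.getD_insert,
    PySem.Dict.getD_empty, ofList_eq_str]
  split_ifs <;> simp_all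

theorem loop_eq : ∀ (n : Nat) (l o : List Char), l.length ≤ n → dhtmlLoop l o = o ++ dhtmlSub l := by
  intro n
  induction n with
  | zero => intro l o h; rw [List.length_eq_zero_iff.mp (Nat.le_zero.mp h)]; simp [dhtmlLoop, dhtmlSub]
  | succ n ih =>
    intro l o h
    match l with
    | [] => simp [dhtmlLoop, dhtmlSub]
    | c :: rest =>
      by_cases hc : c = '&'
      · subst hc
        rw [dhtmlLoop, dhtmlSub]
        simp only [if_true, pred_semi]
        split
        · rename_i e rem hI
          rw [dhtmlInner_eq] at hI
          by_cases h1 : (rest.takeWhile (fun x => !(x == ';'))).length ≤ 11 ∧ rest.drop (rest.takeWhile (fun x => !(x == ';'))).length ≠ []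
          · rw [if_pos h1] at hI
            rw [if_pos h1]
            obtain ⟨he, hrem⟩ : [] ++ rest.takeWhile (fun x => !(x == ';')) = e ∧ rest.drop ((rest.takeWhile (fun x => !(x == ';'))).length + 1) = rem := by
              simpa using hI
            have hlen : rem.length ≤ n := by
              rw [← hrem]; simp at h ⊢; omega
            rw [ih _ _ hlen, ← he, ← hrem, ent_eq]
            simp
          · rw [if_neg h1] at hI; exact absurd hI (by simp)
        · rename_i hI
          rw [dhtmlInner_eq] at hI
          by_cases h1 : (rest.takeWhile (fun x => !(x == ';'))).length ≤ 11 ∧ rest.drop (rest.takeWhile (fun x => !(x == ';'))).length ≠ []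
          · rw [if_pos h1] at hI; exact absurd hI (by simp)
          · rw [if_neg h1, ih rest (o ++ ['&']) (by simp at h; omega)]
            simp
      · rw [dhtmlLoop, dhtmlSub]
        simp only [if_neg hc]
        rw [ih rest (o ++ [c]) (by simp at h; omega)]
        simp


-- ===== VERDICT (by name: the statement is the Claim_ definition above) =====
theorem dhtml_spec : Claim_equal_dhtml := by
  intro s _
  unfold Spec_dhtml dhtml dhtml_alt
  rw [loop_eq s.toList.length s.toList [] le_rfl]
  simp
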